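-- pv_equiv track=rewrite | github.com/2018hsridhar/LEETCODE_REPO_2 | leetcode_840.py | getUpperRight
-- ===== SOURCE A (Python) =====
-- from typing import List
--
-- def getUpperRight(grid: List[List[int]]) -> List[List[int]]:
--     m = len(grid)
--     n = len(grid[0])
--     urSums = [[grid[i][j] for j in range(n)] for i in range(m)]
--     for i in range(m-2,-1,-1):
--         for j in range(1,n,1):
--             urSums[i][j] += urSums[i+1][j-1]
--     return urSums
-- ===== SOURCE B (Python) =====
-- from typing import List
--
-- def getUpperRight(grid: List[List[int]]) -> List[List[int]]:
--     # Closed form per cell: each entry is the sum of its lower-left anti-diagonal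
--     # run, computed directly instead of by the bottom-up DP sweep.
--     m = len(grid)
--     n = len(grid[0])
--     return [[sum(grid[i + k][j - k] for k in range(min(m - 1 - i, j) + 1))
--              for j in range(n)]
--             for i in range(m)]
-- ===== Notes on version B (the rewrite author's own statement) =====
-- stated objective: simpler
-- what changed: Replaces the bottom-up in-place DP sweep (each cell adds its already-accumulated lower-left neighbour) with a direct closed-form comprehension: each output cell is computed as the explicit sum of its lower-left anti-diagonal run, with no mutable result matrix and no dependence between output cells.
import Mathlib
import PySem

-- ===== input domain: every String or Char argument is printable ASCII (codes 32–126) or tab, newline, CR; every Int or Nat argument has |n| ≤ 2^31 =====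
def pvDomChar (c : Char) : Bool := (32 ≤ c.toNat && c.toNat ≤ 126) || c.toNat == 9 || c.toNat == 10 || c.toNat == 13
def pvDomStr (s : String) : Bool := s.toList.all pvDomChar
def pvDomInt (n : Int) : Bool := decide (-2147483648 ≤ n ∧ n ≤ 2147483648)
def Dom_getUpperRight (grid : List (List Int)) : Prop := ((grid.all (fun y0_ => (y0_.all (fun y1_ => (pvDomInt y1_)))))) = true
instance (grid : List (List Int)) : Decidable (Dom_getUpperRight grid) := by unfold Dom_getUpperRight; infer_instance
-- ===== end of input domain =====

-- B replaces A's bottom-up in-place DP sweep by a direct per-cell closed-form sum over the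
-- lower-left anti-diagonal run (objective: simpler — no mutable result matrix, no dependence
-- between output cells). Neither version mutates its argument.

-- ===== PORT A =====
-- 'urSums[i][j] = v'; both loop indices i, j are nonnegative in A's loops, so .toNat is exact here
def pySet2 (M : List (List Int)) (i j : Int) (v : Int) : List (List Int) :=
  M.set i.toNat ((PySem.List.pyGetD M i []).set j.toNat v)

def getUpperRight (grid : List (List Int)) : List (List Int) :=
  let m : Int := grid.length
  let n : Int := (PySem.List.pyGetD grid 0 []).length
  let urSums : List (List Int) :=
    (PySem.List.pyRange 0 m 1).map (fun i =>
      (PySem.List.pyRange 0 n 1).map (fun j =>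
        PySem.List.pyGetD (PySem.List.pyGetD grid i []) j 0))
  (PySem.List.pyRange (m-2) (-1) (-1)).foldl (fun acc i =>
    (PySem.List.pyRange 1 n 1).foldl (fun acc j =>
      pySet2 acc i j (PySem.List.pyGetD (PySem.List.pyGetD acc i []) j 0 +
        PySem.List.pyGetD (PySem.List.pyGetD acc (i+1) []) (j-1) 0)) acc) urSums

-- ===== PORT B =====
def getUpperRight_alt (grid : List (List Int)) : List (List Int) :=
  let m : Int := grid.length
  let n : Int := (PySem.List.pyGetD grid 0 []).length
  (PySem.List.pyRange 0 m 1).map (fun i =>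
    (PySem.List.pyRange 0 n 1).map (fun j =>
      ((PySem.List.pyRange 0 (min (m-1-i) j + 1) 1).map (fun k =>
        PySem.List.pyGetD (PySem.List.pyGetD grid (i+k) []) (j-k) 0)).sum))

-- ===== PRECONDITION & SPEC =====
-- Pre_ excludes exactly the inputs on which the Python A raises IndexError: the empty grid
-- (grid[0] fails) and grids with some row shorter than len(grid[0]) (grid[i][j] fails).
def Pre_getUpperRight (grid : List (List Int)) : Prop :=
  grid ≠ [] ∧ ∀ row ∈ grid, (grid.headD []).length ≤ row.length
instance (grid : List (List Int)) : Decidable (Pre_getUpperRight grid) := by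
  unfold Pre_getUpperRight; infer_instance
def pvWitness_getUpperRight : List (List Int) := [[1, 2], [3, 4]]

def Spec_getUpperRight (grid : List (List Int)) (out : List (List Int)) : Prop := out = getUpperRight_alt grid
instance (grid : List (List Int)) (out : List (List Int)) : Decidable (Spec_getUpperRight grid out) := by unfold Spec_getUpperRight; infer_instance

-- ===== CLAIM (what is proved, stated in full; the proofs are below) =====
def Claim_equal_getUpperRight : Prop := ∀ (grid : List (List Int)), Dom_getUpperRight grid → Pre_getUpperRight grid → Spec_getUpperRight grid (getUpperRight grid)

-- ===== LEMMAS AND PROOFS =====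

-- grid[i][j] with total nat indexing
def pvG (grid : List (List Int)) (i j : ℕ) : Int := (grid.getD i []).getD j 0

-- the anti-diagonal cumulative sum both programs compute
def pvS (grid : List (List Int)) (i j : ℕ) : Int :=
  ((List.range (min (grid.length - 1 - i) j + 1)).map (fun k => pvG grid (i + k) (j - k))).sum

-- an M×N matrix given by a function of the indices
def pvMk (M N : ℕ) (F : ℕ → ℕ → Int) : List (List Int) :=
  (List.range M).map (fun i => (List.range N).map (F i))

-- A's single update step, nat-indexed
def pvUpd (Mt : List (List Int)) (i j : ℕ) : List (List Int) :=
  Mt.set i ((Mt.getD i []).set j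
    ((Mt.getD i []).getD j 0 + (Mt.getD (i + 1) []).getD (j - 1) 0))

-- A's inner loop over j = 1 .. N-1, nat-indexed
def pvInner (N : ℕ) (Mt : List (List Int)) (i : ℕ) : List (List Int) :=
  (List.range (N - 1)).foldl (fun acc q => pvUpd acc i (q + 1)) Mt

-- rows ≥ i0 already hold the diagonal sums, rows < i0 still hold the grid values
def pvT (grid : List (List Int)) (i0 i j : ℕ) : Int :=
  if i0 ≤ i then pvS grid i j else pvG grid i j

-- row i0 updated strictly below column a, rows > i0 done, rest untouched
def pvU (grid : List (List Int)) (i0 a i j : ℕ) : Int :=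
  if i0 < i then pvS grid i j
  else if i = i0 ∧ j < a then pvS grid i j
  else pvG grid i j

theorem pvHead (grid : List (List Int)) :
    PySem.List.pyGetD grid 0 [] = grid.headD [] := by
  cases grid <;> simp [PySem.List.pyGetD_zero]

theorem pvMk_congr {M N : ℕ} {F G : ℕ → ℕ → Int}
    (h : ∀ i, i < M → ∀ j, j < N → F i j = G i j) : pvMk M N F = pvMk M N G := by
  unfold pvMk
  refine List.map_congr_left (fun i hi => ?_)
  exact List.map_congr_left (fun j hj => h i (List.mem_range.mp hi) j (List.mem_range.mp hj))

theorem pvSet_map_range {α : Type} (f : ℕ → α) (M i : ℕ) (v : α) :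
    ((List.range M).map f).set i v = (List.range M).map (fun x => if x = i then v else f x) := by
  apply List.ext_getElem (by simp)
  intro x hx hx'
  simp only [List.getElem_set, List.getElem_map, List.getElem_range]
  split_ifs with h1 h2 h2 <;> first | rfl | omega

theorem pvUpd_mk {M N : ℕ} (F : ℕ → ℕ → Int) {i j : ℕ}
    (hi1 : i + 1 < M) (hj : j < N) (hj1 : 1 ≤ j) :
    pvUpd (pvMk M N F) i j
      = pvMk M N (fun a b => if a = i ∧ b = j then F i j + F (i + 1) (j - 1) else F a b) := by
  unfold pvUpd pvMk
  rw [PySem.List.getD_map_range _ _ _ _ (by omega : i < M),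
      PySem.List.getD_map_range _ _ _ _ hi1,
      PySem.List.getD_map_range _ _ _ _ hj,
      PySem.List.getD_map_range _ _ _ _ (by omega : j - 1 < N),
      pvSet_map_range, pvSet_map_range]
  refine List.map_congr_left (fun a ha => ?_)
  by_cases h : a = i
  · subst h
    simp only [if_pos rfl]
    refine List.map_congr_left (fun b hb => ?_)
    by_cases hb' : b = j
    · simp [hb']
    · simp [hb']
  · simp only [if_neg h]
    refine List.map_congr_left (fun b hb => ?_)
    simp [h]

theorem pvS_zero (grid : List (List Int)) (i : ℕ) : pvS grid i 0 = pvG grid i 0 := by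
  simp [pvS]

theorem pvS_last (grid : List (List Int)) {i : ℕ} (h : grid.length ≤ i + 1) (j : ℕ) :
    pvS grid i j = pvG grid i j := by
  have : grid.length - 1 - i = 0 := by omega
  simp [pvS, this]

theorem pvS_rec (grid : List (List Int)) {i j : ℕ}
    (hi : i + 1 < grid.length) (hj : 1 ≤ j) :
    pvS grid i j = pvG grid i j + pvS grid (i + 1) (j - 1) := by
  unfold pvS
  have h : min (grid.length - 1 - i) j + 1 = (min (grid.length - 1 - (i + 1)) (j - 1) + 1) + 1 := by
    omega
  rw [h, List.range_succ_eq_map]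
  simp only [List.map_cons, List.map_map, List.sum_cons, Nat.add_zero, Nat.sub_zero]
  congr 2
  apply List.map_congr_left
  intro k _
  simp only [Function.comp_apply]
  congr 1 <;> omega

theorem pvInner_aux (grid : List (List Int)) {M N : ℕ} (hM : M = grid.length)
    {i0 : ℕ} (hi : i0 + 1 < M) :
    ∀ c, c ≤ N - 1 →
      (List.range c).foldl (fun acc q => pvUpd acc i0 (q + 1)) (pvMk M N (pvT grid (i0 + 1)))
        = pvMk M N (pvU grid i0 (c + 1)) := by
  intro c
  induction c with
  | zero =>
    intro _
    simp only [List.range_zero, List.foldl_nil]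
    refine pvMk_congr (fun i hiM j hjN => ?_)
    unfold pvT pvU
    split_ifs <;>
      first
        | rfl
        | omega
        | (exfalso; omega)
        | (have hj0 : j = 0 := by omega
           subst hj0
           first
             | exact (pvS_zero grid i).symm
             | exact pvS_zero grid i)
  | succ c ih =>
    intro hc
    rw [List.range_succ, List.foldl_append, ih (by omega), List.foldl_cons, List.foldl_nil]
    rw [pvUpd_mk _ hi (by omega) (by omega)]
    refine pvMk_congr (fun i hiM j hjN => ?_)
    by_cases hcell : i = i0 ∧ j = c + 1
    · obtain ⟨h1, h2⟩ := hcell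
      subst h1
      subst h2
      rw [if_pos ⟨rfl, rfl⟩]
      unfold pvU
      rw [if_neg (by omega), if_neg (by omega), if_pos (by omega), if_neg (by omega),
          if_pos ⟨rfl, by omega⟩]
      have hrec := pvS_rec grid (i := i) (j := c + 1) (by omega) (by omega)
      simp only [Nat.add_sub_cancel] at hrec ⊢
      omega
    · rw [if_neg hcell]
      unfold pvU
      split_ifs <;> first | rfl | omega | (exfalso; omega)

theorem pvInner_T (grid : List (List Int)) {M N : ℕ} (hM : M = grid.length)
    {i0 : ℕ} (hi : i0 + 1 < M) :
    pvInner N (pvMk M N (pvT grid (i0 + 1))) i0 = pvMk M N (pvT grid i0) := by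
  unfold pvInner
  rw [pvInner_aux grid hM hi (N - 1) le_rfl]
  refine pvMk_congr (fun i hiM j hjN => ?_)
  unfold pvU pvT
  split_ifs <;> first | rfl | omega | (exfalso; omega)

theorem pvOuter_aux (grid : List (List Int)) {M N : ℕ} (hM : M = grid.length) :
    ∀ c, c ≤ M - 1 →
      (List.range c).foldl (fun acc k => pvInner N acc (M - 2 - k)) (pvMk M N (pvG grid))
        = pvMk M N (pvT grid (M - 1 - c)) := by
  intro c
  induction c with
  | zero =>
    intro _
    simp only [List.range_zero, List.foldl_nil, Nat.sub_zero]
    refine pvMk_congr (fun i hiM j hjN => ?_)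
    unfold pvT
    by_cases h : M - 1 ≤ i
    · rw [if_pos h, pvS_last grid (by omega) j]
    · rw [if_neg h]
  | succ c ih =>
    intro hc
    rw [List.range_succ, List.foldl_append, ih (by omega), List.foldl_cons, List.foldl_nil]
    have h1 : M - 1 - c = (M - 2 - c) + 1 := by omega
    rw [h1, pvInner_T grid hM (by omega)]
    have h2 : M - 1 - (c + 1) = M - 2 - c := by omega
    rw [h2]

theorem pvBridgeB (grid : List (List Int)) :
    getUpperRight_alt grid = pvMk grid.length ((grid.headD []).length) (pvS grid) := by
  simp only [getUpperRight_alt]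
  unfold pvMk
  rw [pvHead]
  rw [PySem.List.pyRange_zero_natCast grid.length,
      PySem.List.pyRange_zero_natCast (grid.headD []).length]
  rw [List.map_map]
  refine List.map_congr_left (fun i hi => ?_)
  rw [List.mem_range] at hi
  simp only [Function.comp_apply]
  rw [List.map_map]
  refine List.map_congr_left (fun j hj => ?_)
  rw [List.mem_range] at hj
  simp only [Function.comp_apply]
  unfold pvS
  have hmin : min ((grid.length : Int) - 1 - (i : Int)) (j : Int) + 1
      = ((min (grid.length - 1 - i) j + 1 : ℕ) : Int) := by
    omega
  rw [hmin, PySem.List.pyRange_zero_natCast, List.map_map]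
  congr 1
  refine List.map_congr_left (fun k hk => ?_)
  rw [List.mem_range] at hk
  simp only [Function.comp_apply]
  have h1 : (i : Int) + (k : Int) = ((i + k : ℕ) : Int) := by push_cast; ring
  have h2 : (j : Int) - (k : Int) = ((j - k : ℕ) : Int) := by omega
  rw [h1, h2, PySem.List.pyGetD_natCast, PySem.List.pyGetD_natCast]
  rfl

theorem pvBridgeA (grid : List (List Int)) :
    getUpperRight grid
      = (List.range (grid.length - 1)).foldl
          (fun acc k => pvInner ((grid.headD []).length) acc (grid.length - 2 - k))
          (pvMk grid.length ((grid.headD []).length) (pvG grid)) := by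
  simp only [getUpperRight]
  rw [pvHead]
  set L := grid.length with hL
  set N := (grid.headD []).length with hN
  -- the initial matrix
  have hinit : (PySem.List.pyRange 0 (L : Int) 1).map (fun i =>
      (PySem.List.pyRange 0 (N : Int) 1).map (fun j =>
        PySem.List.pyGetD (PySem.List.pyGetD grid i []) j 0)) = pvMk L N (pvG grid) := by
    rw [PySem.List.pyRange_zero_natCast L, List.map_map]
    refine List.map_congr_left (fun i hi => ?_)
    simp only [Function.comp_apply]
    rw [PySem.List.pyRange_zero_natCast N, List.map_map]
    refine List.map_congr_left (fun j hj => ?_)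
    simp only [Function.comp_apply]
    rw [PySem.List.pyGetD_natCast, PySem.List.pyGetD_natCast]
    rfl
  rw [hinit]
  -- the outer countdown range
  rw [PySem.List.pyRange_neg_one ((L : Int) - 2) (-1)]
  have hlen : (((L : Int) - 2) - (-1)).toNat = L - 1 := by omega
  rw [hlen, List.foldl_map]
  refine PySem.List.foldl_congr_mem _ _ _ _ (fun acc k hk => ?_)
  rw [List.mem_range] at hk
  have hcast : (L : Int) - 2 - (k : Int) = ((L - 2 - k : ℕ) : Int) := by omega
  rw [hcast]
  -- the inner range
  unfold pvInner
  rw [PySem.List.pyRange_one 1 (N : Int)]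
  have hlen2 : ((N : Int) - 1).toNat = N - 1 := by omega
  rw [hlen2, List.foldl_map]
  refine PySem.List.foldl_congr_mem _ _ _ _ (fun acc2 q _ => ?_)
  have hjq : (1 : Int) + (q : Int) = ((q + 1 : ℕ) : Int) := by push_cast; ring
  rw [hjq]
  -- one update step
  unfold pySet2 pvUpd
  rw [PySem.List.pyGetD_natCast, PySem.List.pyGetD_natCast]
  have hi1 : ((L - 2 - k : ℕ) : Int) + 1 = ((L - 2 - k + 1 : ℕ) : Int) := by push_cast; ring
  have hj1 : ((q + 1 : ℕ) : Int) - 1 = ((q + 1 - 1 : ℕ) : Int) := by omega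
  rw [hi1, hj1]
  simp only [PySem.List.pyGetD_natCast, Int.toNat_natCast]

-- ===== VERDICT (by name: the statement is the Claim_ definition above) =====
theorem getUpperRight_spec : Claim_equal_getUpperRight := by
  intro grid _ _
  unfold Spec_getUpperRight
  rw [pvBridgeA grid, pvBridgeB grid]
  rw [pvOuter_aux grid rfl (grid.length - 1) le_rfl]
  simp only [Nat.sub_self]
  exact pvMk_congr (fun i _ j _ => by simp [pvT])
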